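-- pv_equiv track=rewrite | github.com/hshany/alphafold3 | myscripts/peptide_variant_screen_1seed.py | _chain_index_mapping
-- ===== SOURCE A (Python) =====
-- from typing import Dict, List, Optional, Sequence
--
-- def _chain_index_mapping(token_chain_ids: Sequence[str]) -> Dict[str, int]:
--     """Builds chain_id -> chain_index mapping from token chain ids order of appearance."""
--     mapping: Dict[str, int] = {}
--     order = []
--     for cid in token_chain_ids:
--         if cid not in mapping:
--             mapping[cid] = len(mapping)
--             order.append(cid)
--     return mapping
-- ===== SOURCE B (Python) =====
-- def _chain_index_mapping(token_chain_ids):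
--     """Builds chain_id -> chain_index mapping from token chain ids order of appearance."""
--     remaining = list(token_chain_ids)
--     mapping = {}
--     idx = 0
--     while remaining:
--         head = remaining[0]
--         mapping[head] = idx
--         idx += 1
--         remaining = [c for c in remaining if c != head]
--     return mapping
-- ===== Notes on version B (the rewrite author's own statement) =====
-- stated objective: alternative
-- what changed: Replaces A's single membership-guarded accumulation pass (with its dead 'order' list) by a peel-and-filter loop: repeatedly take the first remaining id, assign it the next index, and filter all its occurrences out of the remaining list, so no membership test or dict lookup is ever performed.
import Mathlib
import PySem

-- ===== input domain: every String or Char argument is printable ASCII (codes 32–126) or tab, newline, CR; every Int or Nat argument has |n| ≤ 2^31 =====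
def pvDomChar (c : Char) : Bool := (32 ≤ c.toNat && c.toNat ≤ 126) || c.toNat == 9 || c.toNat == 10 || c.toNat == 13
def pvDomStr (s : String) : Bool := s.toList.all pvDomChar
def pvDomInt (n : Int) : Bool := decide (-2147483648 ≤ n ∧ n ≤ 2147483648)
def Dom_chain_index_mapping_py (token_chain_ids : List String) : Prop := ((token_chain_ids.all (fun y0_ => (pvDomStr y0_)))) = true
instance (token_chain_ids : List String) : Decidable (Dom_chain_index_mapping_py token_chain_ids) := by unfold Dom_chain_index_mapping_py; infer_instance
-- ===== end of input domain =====

-- B replaces A's membership-guarded accumulation loop by a peel-and-filter loop (alternative algorithm; same return value).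


-- ===== PORT A =====
-- for cid in token_chain_ids: if cid not in mapping: mapping[cid] = len(mapping); order.append(cid)
def chain_index_mapping_py (token_chain_ids : List String) : List (String × Int) :=
  let st := token_chain_ids.foldl
    (fun (st : PySem.Dict String Int × List String) cid =>
      if st.1.contains cid then st
      else (st.1.insert cid (st.1.size : Int), st.2 ++ [cid]))
    (PySem.Dict.empty, [])
  st.1.items

-- ===== PORT B =====
-- while remaining: head = remaining[0]; mapping[head] = idx; idx += 1;
--                  remaining = [c for c in remaining if c != head]
def cimAltLoop (remaining : List String) (mapping : PySem.Dict String Int) (idx : Int) :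
    PySem.Dict String Int :=
  match remaining with
  | [] => mapping
  | h :: t =>
      cimAltLoop ((h :: t).filter (fun c => !(c == h))) (mapping.insert h idx) (idx + 1)
termination_by remaining.length
decreasing_by
  simp only [List.filter_cons, beq_self_eq_true, Bool.not_true, List.length_cons]
  exact Nat.lt_succ_of_le (List.length_filter_le _ _)

def chain_index_mapping_py_alt (token_chain_ids : List String) : List (String × Int) :=
  (cimAltLoop token_chain_ids PySem.Dict.empty 0).items

-- ===== PRECONDITION & SPEC =====
def Spec_chain_index_mapping_py (token_chain_ids : List String) (out : List (String × Int)) : Prop := out = chain_index_mapping_py_alt token_chain_ids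
instance (token_chain_ids : List String) (out : List (String × Int)) : Decidable (Spec_chain_index_mapping_py token_chain_ids out) := by unfold Spec_chain_index_mapping_py; infer_instance

-- ===== CLAIM (what is proved, stated in full; the proofs are below) =====
def Claim_equal_chain_index_mapping_py : Prop := ∀ (token_chain_ids : List String), Dom_chain_index_mapping_py token_chain_ids → Spec_chain_index_mapping_py token_chain_ids (chain_index_mapping_py token_chain_ids)

-- ===== LEMMAS AND PROOFS =====

-- A's fold on the (dict, order) pair: the dict component ignores the dead 'order' list.
lemma cim_fold_fst (xs : List String) :
    ∀ (st : PySem.Dict String Int × List String),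
    (xs.foldl
      (fun (st : PySem.Dict String Int × List String) cid =>
        if st.1.contains cid then st
        else (st.1.insert cid (st.1.size : Int), st.2 ++ [cid])) st).1
    = xs.foldl
      (fun (d : PySem.Dict String Int) cid =>
        if d.contains cid then d else d.insert cid (d.size : Int)) st.1 := by
  induction xs with
  | nil => intro st; rfl
  | cons c xs ih =>
    intro st
    simp only [List.foldl_cons]
    by_cases h : st.1.contains c
    · simp [h, ih]
    · simp [h, ih ((st.1.insert c (st.1.size : Int), st.2 ++ [c]))]

-- Invariant for A: if d's items are exactly its keys paired with 0,1,2,…, the guarded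
-- insert loop preserves that, and the resulting key list is d.keys updated (as a set) by xs.
lemma cim_fold_items (xs : List String) :
    ∀ (d : PySem.Dict String Int),
    d.items = (PySem.List.enumerate d.keys 0).map (fun p => (p.2, p.1)) →
    (xs.foldl
      (fun (d : PySem.Dict String Int) cid =>
        if d.contains cid then d else d.insert cid (d.size : Int)) d).items
    = (PySem.List.enumerate (PySem.Set.update d.keys xs) 0).map (fun p => (p.2, p.1)) := by
  induction xs with
  | nil => intro d h; simpa [PySem.Set.update] using h
  | cons c xs ih =>
    intro d h
    simp only [List.foldl_cons, PySem.Set.update_cons]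
    by_cases hc : d.contains c
    · have hmem : c ∈ d.keys := (PySem.Dict.contains_iff_mem_keys d c).1 hc
      have hadd : PySem.Set.add d.keys c = d.keys := by
        simp [PySem.Set.add, PySem.Set.contains, hmem]
      rw [if_pos hc, hadd]
      exact ih d h
    · have hsize : d.size = d.keys.length := by
        have : d.items.length = d.keys.length := by
          rw [h]; simp [PySem.List.length_enumerate]
        simpa [PySem.Dict.size] using this
      have hnc : d.contains c = false := by simpa using hc
      have hkeys : (d.insert c (d.size : Int)).keys = d.keys ++ [c] := by
        simp [PySem.Dict.keys_insert_of_not_contains, hnc]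
      have hitems : (d.insert c (d.size : Int)).items = d.items ++ [(c, (d.size : Int))] := by
        simp [PySem.Dict.items_insert_of_not_contains, hnc]
      have hadd : PySem.Set.add d.keys c = d.keys ++ [c] := by
        have hmem : c ∉ d.keys := fun hm => hc ((PySem.Dict.contains_iff_mem_keys d c).2 hm)
        simp [PySem.Set.add, PySem.Set.contains, hmem]
      rw [if_neg hc, hadd, ← hkeys]
      refine ih _ ?_
      rw [hitems, hkeys, h, PySem.List.enumerate_append]
      simp [PySem.List.enumerate_cons, hsize]

-- Removing one element from an ordered-dedup commutes with filtering the source list.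
lemma cim_discard_eq (s : List String) (x : String) :
    PySem.Set.discard s x = s.filter (fun c => !(c == x)) := rfl

lemma cim_filter_ofList (t : List String) (x : String) :
    (PySem.Set.ofList t).filter (fun c => !(c == x))
      = PySem.Set.ofList (t.filter (fun c => !(c == x))) := by
  induction t with
  | nil => rfl
  | cons c t ih =>
    rw [PySem.Set.ofList_cons, cim_discard_eq]
    by_cases hcx : c = x
    · subst hcx
      rw [List.filter_cons]
      simp only [beq_self_eq_true, Bool.not_true, Bool.false_eq_true, if_false,
        List.filter_filter, Bool.and_self]
      rw [ih, List.filter_cons]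
      simp
    · have hb : (c == x) = false := by simpa using hcx
      rw [List.filter_cons, hb]
      simp only [Bool.not_false, if_true, List.filter_filter]
      have hR : List.filter (fun c' => !(c' == x)) (c :: t) = c :: List.filter (fun c' => !(c' == x)) t := by
        simp [hb]
      rw [hR, PySem.Set.ofList_cons, cim_discard_eq, ← ih, List.filter_filter]
      simp [Bool.and_comm]

lemma cim_discard_ofList (t : List String) (x : String) :
    PySem.Set.discard (PySem.Set.ofList t) x
      = PySem.Set.ofList (t.filter (fun c => !(c == x))) := by
  rw [cim_discard_eq, cim_filter_ofList]

-- Ordered dedup peels its head: first occurrences of h::t are h, then dedup of t without h.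
lemma cim_dedup_cons (h : String) (t : List String) :
    PySem.List.dedup (h :: t) = h :: PySem.List.dedup (t.filter (fun c => !(c == h))) := by
  simp only [PySem.List.dedup_eq_ofList, PySem.Set.ofList_cons, cim_discard_ofList]

-- Invariant for B's peel loop: with all remaining ids fresh for 'mapping', the loop
-- appends (id, index) pairs for the deduped remainder, indexed from 'idx'.
lemma cimAltLoop_items (n : Nat) : ∀ (xs : List String), xs.length ≤ n →
    ∀ (m : PySem.Dict String Int) (idx : Int),
    (∀ c ∈ xs, m.contains c = false) →
    (cimAltLoop xs m idx).items
      = m.items ++ (PySem.List.enumerate (PySem.List.dedup xs) idx).map (fun p => (p.2, p.1)) := by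
  induction n with
  | zero =>
    intro xs hlen m idx _
    have : xs = [] := List.length_eq_zero_iff.1 (Nat.le_zero.1 hlen)
    subst this
    simp [cimAltLoop, PySem.List.dedup]
  | succ n ih =>
    intro xs hlen m idx hfresh
    match xs with
    | [] => simp [cimAltLoop, PySem.List.dedup]
    | h :: t =>
      have hh : m.contains h = false := hfresh h (by simp)
      have hfilter : (h :: t).filter (fun c => !(c == h)) = t.filter (fun c => !(c == h)) := by
        simp
      have hlen' : (t.filter (fun c => !(c == h))).length ≤ n := by
        have := List.length_filter_le (fun c => !(c == h)) t
        have ht : t.length ≤ n := Nat.le_of_succ_le_succ hlen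
        omega
      have hfresh' : ∀ c ∈ t.filter (fun c => !(c == h)), (m.insert h idx).contains c = false := by
        intro c hc
        have hct : c ∈ t := List.mem_of_mem_filter hc
        have hcne : c ≠ h := by
          have := List.of_mem_filter hc
          simpa using this
        have hcm : m.contains c = false := hfresh c (by simp [hct])
        have hkeys : (m.insert h idx).keys = m.keys ++ [h] :=
          PySem.Dict.keys_insert_of_not_contains m idx hh
        have : c ∉ (m.insert h idx).keys := by
          rw [hkeys]
          simp only [List.mem_append, List.mem_singleton]
          rintro (hmem | rfl)
          · exact absurd ((PySem.Dict.contains_iff_mem_keys m c).2 hmem) (by simp [hcm])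
          · exact hcne rfl
        simpa using fun hcon => this ((PySem.Dict.contains_iff_mem_keys _ c).1 hcon)
      rw [cimAltLoop, hfilter, ih _ hlen' _ _ hfresh',
        PySem.Dict.items_insert_of_not_contains m idx hh, cim_dedup_cons,
        PySem.List.enumerate_cons]
      simp

-- ===== VERDICT (by name: the statement is the Claim_ definition above) =====
theorem chain_index_mapping_py_spec : Claim_equal_chain_index_mapping_py := by
  intro xs _
  unfold Spec_chain_index_mapping_py chain_index_mapping_py chain_index_mapping_py_alt
  have hA := cim_fold_items xs PySem.Dict.empty (by simp [PySem.Dict.empty, PySem.Dict.keys])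
  have hfst := cim_fold_fst xs (PySem.Dict.empty, [])
  have hB := cimAltLoop_items xs.length xs (Nat.le_refl _) PySem.Dict.empty 0
    (by intro c _; simp [PySem.Dict.contains_empty])
  simp only [hfst] at hA ⊢
  rw [hA, hB]
  have hemp : (PySem.Dict.empty : PySem.Dict String Int).items = [] := rfl
  simp [PySem.List.dedup_eq_ofList, PySem.Set.update_nil_left, PySem.Dict.keys_empty, hemp]
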